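-- pv_equiv track=rewrite | github.com/scarletYewon/sparta_codingTest | programmers/135808.py | solution
-- ===== SOURCE A (Python) =====
-- def solution(k, m, score):
--     s = len(score)
--     b = s//m
--     ns = []
--     cnt=0
--     sum = 0
--
--     score.sort(reverse=True)
--
--     for i in range(b):
--         ns.append(score[cnt:cnt+m])
--         cnt+=m
--
--     for i in range(b):
--         sum += min(ns[i])*m
--
--     return sum
-- ===== SOURCE B (Python) =====
-- def solution(k, m, score):
--     # Return-value equivalent to A. Sorts a fresh copy ascending (A sorts `score`
--     # in place descending); the minima of A's descending m-chunks are exactly the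
--     # elements at ascending positions len%m, len%m + m, ... (the first element of
--     # each ascending m-chunk after dropping the remainder), summed in one pass.
--     a = sorted(score)
--     total = 0
--     for i in range(len(a) % m, len(a), m):
--         total += a[i]
--     return total * m
-- ===== Notes on version B (the rewrite author's own statement) =====
-- stated objective: simpler
-- what changed: A sorts descending, materialises a list of m-sized chunks and sums min(chunk)*m over it; B instead sorts a fresh copy ascending and, using n%m as the offset, sums the first element of each ascending m-chunk in a single strided range loop (no chunk list, no min calls), multiplying by m once at the end; B does not mutate score (A sorts it in place).
import Mathlib
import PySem

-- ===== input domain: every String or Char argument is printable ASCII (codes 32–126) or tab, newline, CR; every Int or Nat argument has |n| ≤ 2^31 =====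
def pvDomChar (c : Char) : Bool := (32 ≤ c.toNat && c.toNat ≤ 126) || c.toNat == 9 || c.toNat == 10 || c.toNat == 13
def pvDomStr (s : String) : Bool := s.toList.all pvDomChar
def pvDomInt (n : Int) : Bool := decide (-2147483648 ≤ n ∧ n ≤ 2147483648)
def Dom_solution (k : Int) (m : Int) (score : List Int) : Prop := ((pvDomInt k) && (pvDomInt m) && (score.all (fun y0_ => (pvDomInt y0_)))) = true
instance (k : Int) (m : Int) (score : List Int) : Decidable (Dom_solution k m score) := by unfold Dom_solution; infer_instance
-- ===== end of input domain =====

-- B sorts a fresh copy ASCENDING and sums the elements at positions len%m, len%m+m, …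
-- (the first of each ascending m-chunk after dropping the remainder) in one pass —
-- no chunk list, no min() calls; the equivalence is about the RETURN value (A sorts
-- `score` in place descending, B leaves it untouched).

-- ===== PORT A =====
def solution (k : Int) (m : Int) (score : List Int) : Int :=
  let s : Int := score.length
  let b : Int := PySem.Int.floordiv s m
  let sc : List Int := PySem.List.sorted score (fun x => x) true
  -- first loop: ns.append(score[cnt:cnt+m]); cnt += m
  let st := (PySem.List.pyRange 0 b 1).foldl
    (fun (st : List (List Int) × Int) _ =>
      (st.1 ++ [PySem.List.slice sc (some st.2) (some (st.2 + m))], st.2 + m))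
    (([] : List (List Int)), 0)
  let ns := st.1
  -- second loop: sum += min(ns[i])*m.  ns[i] is always in range and nonempty here,
  -- so the .getD defaults (ValueError/IndexError in Python) are unreachable.
  (PySem.List.pyRange 0 b 1).foldl
    (fun sum i =>
      sum + (PySem.List.min? (PySem.List.pyGetD ns i []) (fun x => x)).getD 0 * m)
    0

-- ===== PORT B =====
def solution_alt (k : Int) (m : Int) (score : List Int) : Int :=
  let a : List Int := PySem.List.sorted score (fun x => x)
  -- for i in range(len(a) % m, len(a), m): total += a[i]   (a[i] always in range here)
  ((PySem.List.pyRange (PySem.Int.mod (a.length : Int) m) (a.length : Int) m).foldl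
    (fun total i => total + PySem.List.pyGetD a i 0) 0) * m

-- ===== PRECONDITION & SPEC =====
-- Pre_ excludes exactly m = 0, where both Pythons raise ZeroDivisionError (A at len(score)//m, B at len(a)%m).
def Pre_solution (k : Int) (m : Int) (score : List Int) : Prop := m ≠ 0
instance (k : Int) (m : Int) (score : List Int) : Decidable (Pre_solution k m score) := by unfold Pre_solution; infer_instance
def pvWitness_solution : Int × Int × List Int := (1, 3, [5, 1, 4, 2, 6, 3])

def Spec_solution (k : Int) (m : Int) (score : List Int) (out : Int) : Prop := out = solution_alt k m score
instance (k : Int) (m : Int) (score : List Int) (out : Int) : Decidable (Spec_solution k m score out) := by unfold Spec_solution; infer_instance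

-- ===== CLAIM (what is proved, stated in full; the proofs are below) =====
def Claim_equal_solution : Prop := ∀ (k : Int) (m : Int) (score : List Int), Dom_solution k m score → Pre_solution k m score → Spec_solution k m score (solution k m score)

-- ===== LEMMAS AND PROOFS =====

theorem pvFloordivNonpos (a b : Int) (ha : 0 ≤ a) (hb : b < 0) : PySem.Int.floordiv a b ≤ 0 := by
  show Int.fdiv a b ≤ 0
  have h := Int.fdiv_nonneg ha (by omega : (0:Int) ≤ -b)
  have h2 := Int.fdiv_neg (b := -b) (a := a) (by omega)
  simp only [neg_neg] at h2
  rw [h2]; split <;> omega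

theorem pvFoldlMinDesc (xs : List Int) (x : Int)
    (h : List.Pairwise (fun a b => b ≤ a) (x :: xs)) :
    xs.foldl min x = (x :: xs).getLast (by simp) := by
  induction xs generalizing x with
  | nil => simp
  | cons y t ih =>
    have hxy : y ≤ x := (List.pairwise_cons.1 h).1 y (by simp)
    have ht : List.Pairwise (fun a b => b ≤ a) (y :: t) := (List.pairwise_cons.1 h).2
    simp only [List.foldl_cons, min_eq_right hxy]
    rw [ih y ht]
    simp [List.getLast_cons]

theorem pvMinDesc (l : List Int) (hne : l ≠ [])
    (h : List.Pairwise (fun a b => b ≤ a) l) :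
    PySem.List.min? l (fun x => x) = some (l.getLast hne) := by
  cases l with
  | nil => simp at hne
  | cons x t => rw [PySem.List.min?_id_cons, pvFoldlMinDesc t x h]

theorem pvBuild (sc : List Int) (m : Int) (l : List Int) (acc : List (List Int)) (c : Int) :
    (l.foldl (fun (st : List (List Int) × Int) _ =>
        (st.1 ++ [PySem.List.slice sc (some st.2) (some (st.2 + m))], st.2 + m)) (acc, c)).1
    = acc ++ (List.range l.length).map
        (fun j : Nat => PySem.List.slice sc (some (c + (j : Int) * m)) (some (c + (j : Int) * m + m))) := by
  induction l generalizing acc c with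
  | nil => simp
  | cons a t ih =>
    rw [List.foldl_cons, ih, List.length_cons, List.range_succ_eq_map, List.map_cons,
      List.map_map]
    simp only [List.append_assoc, List.singleton_append, Nat.cast_zero, zero_mul, add_zero]
    congr 2
    apply List.map_congr_left
    intro j hj
    simp only [Function.comp_apply, Nat.succ_eq_add_one]
    push_cast
    ring_nf

theorem pvFoldlAddMul {β : Type} (l : List β) (g : β → Int) (m a : Int) :
    l.foldl (fun s i => s + g i * m) a = a + (l.map g).sum * m := by
  rw [PySem.List.foldl_add l (fun i => g i * m) a, List.sum_map_mul_right]

theorem pvSumRange (f : Nat → Int) (n : Nat) :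
    ((List.range n).map f).sum = ∑ j ∈ Finset.range n, f j := rfl

-- descending Python sort of Ints = reverse of the ascending one
theorem pvDescEqRevAsc (score : List Int) :
    PySem.List.sorted score (fun x => x) true
      = (PySem.List.sorted score (fun x => x)).reverse := by
  apply List.Perm.eq_of_pairwise (le := fun a b : Int => b ≤ a)
    (fun a b _ _ h1 h2 => le_antisymm h2 h1)
  · exact PySem.List.sorted_pairwise_rev score (fun x => x)
  · rw [List.pairwise_reverse]
    exact PySem.List.sorted_pairwise score (fun x => x)
  · exact ((PySem.List.sorted_perm score (fun x => x) true).trans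
      ((PySem.List.sorted_perm score (fun x => x) false).symm)).trans
      (List.reverse_perm _).symm

theorem pvMain (m : Int) (score : List Int) (hm : m ≠ 0) :
    solution 0 m score = solution_alt 0 m score := by
  unfold solution solution_alt
  simp only []
  set asc : List Int := PySem.List.sorted score (fun x => x) with hasc
  set sc : List Int := PySem.List.sorted score (fun x => x) true with hsc
  have hrev : sc = asc.reverse := pvDescEqRevAsc score
  have hlen : sc.length = score.length := PySem.List.length_sorted score _ true
  have hlenA : asc.length = score.length := PySem.List.length_sorted score _ false
  rcases lt_trichotomy m 0 with hneg | hz | hpos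
  · -- m < 0 : both sides are 0
    have hb : PySem.Int.floordiv (score.length : Int) m ≤ 0 :=
      pvFloordivNonpos _ _ (by positivity) hneg
    rw [PySem.List.pyRange_one_eq_nil hb]
    have hr := PySem.Int.mod_neg_bounds (a := (asc.length : Int)) hneg
    have hempty : PySem.List.pyRange (PySem.Int.mod (asc.length : Int) m) (asc.length : Int) m = [] := by
      simp only [PySem.List.pyRange, if_neg hm, if_neg (by omega : ¬ 0 < m)]
      rw [if_neg (by omega : ¬ ((asc.length : Int) < PySem.Int.mod (asc.length : Int) m))]
      simp
    rw [hempty]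
    simp
  · exact absurd hz hm
  · -- m > 0
    obtain ⟨mn, rfl⟩ : ∃ mn : Nat, m = (mn : Int) := ⟨m.toNat, by omega⟩
    have hmn : 0 < mn := by exact_mod_cast hpos
    rw [PySem.Int.floordiv_natCast]
    set n := score.length with hn
    set bn := n / mn with hbn
    set rn := n % mn with hrn
    have hnbr : n = bn * mn + rn := by rw [hbn, hrn, Nat.mul_comm]; exact (Nat.div_add_mod n mn).symm
    have hrm : rn < mn := Nat.mod_lt _ hmn
    have hchunk : ∀ j : Nat, j < bn → j * mn + mn ≤ n := by
      intro j hj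
      have h1 : (j + 1) * mn ≤ bn * mn := Nat.mul_le_mul_right _ hj
      have h3 : (j + 1) * mn = j * mn + mn := by ring
      omega
    -- ---- A side: the chunk list, then the min-sum
    rw [pvBuild]
    have hlenrange : (PySem.List.pyRange 0 (bn : Int) 1).length = bn := by
      simp [PySem.List.length_pyRange_one]
    rw [hlenrange]
    set ns := (List.range bn).map
      (fun j : Nat => PySem.List.slice sc (some (0 + (j : Int) * (mn : Int)))
        (some (0 + (j : Int) * (mn : Int) + (mn : Int)))) with hns
    rw [PySem.List.pyRange_one 0 (bn : Int)]
    simp only [sub_zero, Int.toNat_natCast, zero_add, List.foldl_map, List.nil_append]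
    rw [pvFoldlAddMul]
    -- ---- B side: the strided range, then the sum
    rw [hlenA, PySem.Int.mod_natCast]
    have hcount : PySem.List.pyRange ((rn : Nat) : Int) (n : Int) (mn : Int)
        = (List.range bn).map (fun k : Nat => ((rn : Nat) : Int) + (mn : Int) * k) := by
      rw [PySem.List.pyRange_of_pos _ _ hpos]
      congr 2
      by_cases hb0 : 0 < bn
      · have hmb : mn ≤ bn * mn := Nat.le_mul_of_pos_left _ hb0
        have hrnn : rn < n := by omega
        rw [if_pos (by exact_mod_cast hrnn)]
        have : ((n : Int) - (rn : Int) + (mn : Int) - 1) = ((mn : Int) - 1) + (bn : Int) * (mn : Int) := by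
          have := hnbr; push_cast [this]; ring
        rw [this, Int.add_mul_ediv_right _ _ (by exact_mod_cast hmn.ne' : ((mn : Nat) : Int) ≠ 0)]
        rw [Int.ediv_eq_zero_of_lt (by omega) (by omega)]
        simp
      · have hbe : bn = 0 := by omega
        have hne : n = rn := by simpa [hbe] using hnbr
        have : ¬ (((rn : Nat) : Int) < (n : Int)) := by exact_mod_cast (by omega : ¬ rn < n)
        rw [if_neg this, hbe]
    rw [hcount, List.foldl_map, PySem.List.foldl_add]
    simp only [zero_add]
    congr 1
    -- both sums over List.range bn → Finset.range bn, then reflect the index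
    rw [pvSumRange, pvSumRange]
    have hA : ∀ j ∈ Finset.range bn,
        (PySem.List.min? (PySem.List.pyGetD ns (j : Int) []) (fun x => x)).getD 0
          = asc.getD (rn + (bn - 1 - j) * mn) 0 := by
      intro j hj
      rw [Finset.mem_range] at hj
      have hje := hchunk j hj
      have hjm : (j + 1) * mn ≤ bn * mn := Nat.mul_le_mul_right _ hj
      have hjm' : (j + 1) * mn = j * mn + mn := by ring
      have hns_getD : PySem.List.pyGetD ns (j : Int) [] =
          PySem.List.slice sc (some (0 + (j : Int) * (mn : Int)))
            (some (0 + (j : Int) * (mn : Int) + (mn : Int))) := by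
        rw [PySem.List.pyGetD_natCast]
        rw [List.getD_eq_getElem _ _ (by simp [hns, hj])]
        simp [hns]
      have hslice : PySem.List.slice sc (some (0 + (j : Int) * (mn : Int)))
            (some (0 + (j : Int) * (mn : Int) + (mn : Int)))
          = (sc.drop (j * mn)).take mn := by
        have : (0 + (j : Int) * (mn : Int)) = ((j * mn : Nat) : Int) := by push_cast; ring
        rw [this, ← PySem.List.slice_natCast_add sc (j * mn) mn]
      set ch := (sc.drop (j * mn)).take mn with hch
      have hl2 : ch.length = mn := by
        simp only [hch, List.length_take, List.length_drop, hlen]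
        omega
      have hchne : ch ≠ [] := by
        intro h; rw [h] at hl2; simp at hl2; omega
      have hpw : List.Pairwise (fun a b => b ≤ a) ch := by
        have hsub : ch.Sublist sc := (List.take_sublist _ _).trans (List.drop_sublist _ _)
        exact (PySem.List.sorted_pairwise_rev score (fun x => x)).sublist hsub
      have hidx : j * mn + (mn - 1) < sc.length := by omega
      have hlast : ch.getLast hchne = sc[j * mn + (mn - 1)] := by
        rw [List.getLast_eq_getElem, ← List.getD_eq_getElem ch 0 (by omega), hl2,
          List.getD_eq_getElem _ _ (by omega)]
        simp only [hch, List.getElem_take, List.getElem_drop]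
      rw [hns_getD, hslice, pvMinDesc ch hchne hpw]
      simp only [Option.getD_some]
      rw [hlast]
      -- sc[i] = asc.reverse[i] = asc[n-1-i], rewritten as a total getD
      have hidxA : sc.length - 1 - (j * mn + (mn - 1)) < asc.length := by
        rw [hlen, hlenA]; omega
      have : sc[j * mn + (mn - 1)] = asc[sc.length - 1 - (j * mn + (mn - 1))] := by
        simp only [hrev] at hidx ⊢
        rw [List.getElem_reverse]
        simp
      rw [this, ← List.getD_eq_getElem _ 0 hidxA]
      congr 1
      rw [hlen]
      have h1 : (bn - 1 - j) * mn = bn * mn - mn - j * mn := by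
        rw [Nat.sub_mul, Nat.sub_mul, Nat.one_mul]
      omega
    rw [Finset.sum_congr rfl hA,
      Finset.sum_range_reflect (fun t => asc.getD (rn + t * mn) 0) bn]
    apply Finset.sum_congr rfl
    intro k hk
    rw [Finset.mem_range] at hk
    rw [(by push_cast; ring : ((rn : Nat) : Int) + (mn : Int) * (k : Int) = ((rn + k * mn : Nat) : Int)),
      PySem.List.pyGetD_natCast]

-- ===== VERDICT (by name: the statement is the Claim_ definition above) =====
theorem solution_spec : Claim_equal_solution := by
  intro k m score _ hm
  show solution k m score = solution_alt k m score
  have h0 : solution k m score = solution 0 m score := rfl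
  have h1 : solution_alt k m score = solution_alt 0 m score := rfl
  rw [h0, h1]
  exact pvMain m score hm
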